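-- pv_equiv track=rewrite | github.com/gjbr5/Algorithm-Study | Programmers/Problem60000s/Prob67256.py | solution
-- ===== SOURCE A (Python) =====
-- def getld(left, num):
--     mid = (2, 5, 8, 0)
--     dist = 0
--     if left in (1, 4, 7, -1):
--         left += 1
--         dist += 1
--     dist += abs(mid.index(num) - mid.index(left))
--     return dist
--
-- def getrd(right, num):
--     mid = (2, 5, 8, 0)
--     dist = 0
--     if right in (3, 6, 9, 1):
--         right -= 1
--         dist += 1
--     dist += abs(mid.index(num) - mid.index(right))
--     return dist
--
-- def solution(numbers, hand):
--     left, right = -1, 1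
--     answer = []
--     for num in numbers:
--         if num in (1, 4, 7):
--             answer.append('L')
--             left = num
--         elif num in (3, 6, 9):
--             answer.append('R')
--             right = num
--         else:
--             ld = getld(left, num)
--             rd = getrd(right, num)
--             if ld == rd:
--                 if hand == 'left':
--                     answer.append('L')
--                     left = num
--                 else:
--                     answer.append('R')
--                     right = num
--             elif ld > rd:
--                 answer.append('R')
--                 right = num
--             else:
--                 answer.append('L')
--                 left = num
--     return ''.join(answer)
--
-- numbers = [1, 3, 4, 5, 8, 2, 1, 4, 5, 9, 5]
--
-- hand = "right"
-- ===== SOURCE B (Python) =====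
-- POS = [(3, 1), (0, 0), (0, 1), (0, 2),
--        (1, 0), (1, 1), (1, 2),
--        (2, 0), (2, 1), (2, 2),
--        (3, 0), (3, 2)]  # index: digit 0-9 at its own index, 10 = '*', 11 = '#'
--
-- def _step(l, r, num, is_left):
--     if num in (1, 4, 7):
--         return ('L', num, r)
--     if num in (3, 6, 9):
--         return ('R', l, num)
--     (lr, lc), (rr, rc), (tr, tc) = POS[l], POS[r], POS[num]
--     ld = abs(lr - tr) + abs(lc - tc)
--     rd = abs(rr - tr) + abs(rc - tc)
--     if ld < rd or (ld == rd and is_left):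
--         return ('L', num, r)
--     return ('R', l, num)
--
-- # full transition table of the finger automaton, built once:
-- # state = (left index, right index), input = (key, hand flag)
-- TABLE = [_step(i // 240, i // 20 % 12, i // 2 % 10, i % 2 == 1)
--          for i in range(2880)]
--
-- def solution(numbers, hand):
--     h = 1 if hand == 'left' else 0
--     l, r = 10, 11
--     out = []
--     for num in numbers:
--         ch, l, r = TABLE[(l * 12 + r) * 20 + num * 2 + h]
--         out.append(ch)
--     return ''.join(out)
-- ===== Notes on version B (the rewrite author's own statement) =====
-- stated objective: alternative
-- what changed: B compiles the finger automaton once into a precomputed 2880-entry transition table (12x12 thumb-position states x 10 keys x 2 hands, built from a 2-D keypad coordinate map) and the per-key loop is reduced to a single indexed table lookup with no distance computation, whereas A recomputes tuple-index distances with helper functions on every key press.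
import Mathlib
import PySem

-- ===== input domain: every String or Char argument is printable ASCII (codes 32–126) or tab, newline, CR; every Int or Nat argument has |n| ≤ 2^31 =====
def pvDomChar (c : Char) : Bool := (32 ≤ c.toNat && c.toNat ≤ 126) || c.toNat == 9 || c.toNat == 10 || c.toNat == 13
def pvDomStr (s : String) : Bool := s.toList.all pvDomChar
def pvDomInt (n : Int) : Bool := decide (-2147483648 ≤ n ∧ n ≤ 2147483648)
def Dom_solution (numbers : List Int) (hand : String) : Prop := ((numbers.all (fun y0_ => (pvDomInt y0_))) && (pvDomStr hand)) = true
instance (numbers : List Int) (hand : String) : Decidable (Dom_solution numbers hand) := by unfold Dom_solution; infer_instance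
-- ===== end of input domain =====

-- B compiles the finger automaton into a precomputed transition table (2880 entries:
-- 12x12 thumb states x 10 keys x 2 hands) so the per-key loop is one table lookup; objective: alternative.


-- ===== PORT A =====
-- mid = (2, 5, 8, 0)
def pvMid : List Int := [2, 5, 8, 0]

-- getld; none = ValueError from mid.index (excluded by Pre_)
def getld (left num : Int) : Option Int :=
  let p : Int × Int :=
    if left = 1 ∨ left = 4 ∨ left = 7 ∨ left = -1 then (left + 1, 1) else (left, 0)
  match PySem.List.index? pvMid num with
  | none => none
  | some i =>
    match PySem.List.index? pvMid p.1 with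
    | none => none
    | some j => some (p.2 + (((i : Int) - (j : Int)).natAbs : Int))

-- getrd; none = ValueError from mid.index (excluded by Pre_)
def getrd (right num : Int) : Option Int :=
  let p : Int × Int :=
    if right = 3 ∨ right = 6 ∨ right = 9 ∨ right = 1 then (right - 1, 1) else (right, 0)
  match PySem.List.index? pvMid num with
  | none => none
  | some i =>
    match PySem.List.index? pvMid p.1 with
    | none => none
    | some j => some (p.2 + (((i : Int) - (j : Int)).natAbs : Int))

-- the for-loop of A; state = (left, right) digits and the answer list; none = ValueError
def solutionLoop (hand : String) : List Int → Int → Int → List Char → Option (List Char)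
  | [], _, _, acc => some acc
  | num :: rest, left, right, acc =>
    if num = 1 ∨ num = 4 ∨ num = 7 then
      solutionLoop hand rest num right (acc ++ ['L'])
    else if num = 3 ∨ num = 6 ∨ num = 9 then
      solutionLoop hand rest left num (acc ++ ['R'])
    else
      match getld left num with
      | none => none
      | some ld =>
        match getrd right num with
        | none => none
        | some rd =>
          if ld = rd then
            if hand = "left" then solutionLoop hand rest num right (acc ++ ['L'])
            else solutionLoop hand rest left num (acc ++ ['R'])
          else if ld > rd then solutionLoop hand rest left num (acc ++ ['R'])
          else solutionLoop hand rest num right (acc ++ ['L'])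

def solution (numbers : List Int) (hand : String) : String :=
  match solutionLoop hand numbers (-1) 1 [] with
  | some cs => String.ofList cs   -- ''.join(answer)
  | none => ""                    -- unreachable under Pre_ (Python raises ValueError)

-- ===== PORT B =====
-- POS: index 0-9 = the digit's (row, col), 10 = '*', 11 = '#'
def pvPOSL : List (Int × Int) :=
  [(3, 1), (0, 0), (0, 1), (0, 2),
   (1, 0), (1, 1), (1, 2),
   (2, 0), (2, 1), (2, 2),
   (3, 0), (3, 2)]

-- _step; none = IndexError from POS[...] (never reached by the table construction)
def pvStep (l r num : Int) (isLeft : Bool) : Option (Char × Int × Int) :=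
  if num = 1 ∨ num = 4 ∨ num = 7 then some ('L', num, r)
  else if num = 3 ∨ num = 6 ∨ num = 9 then some ('R', l, num)
  else
    match PySem.List.pyGet? pvPOSL l, PySem.List.pyGet? pvPOSL r, PySem.List.pyGet? pvPOSL num with
    | some lp, some rp, some tp =>
      let ld : Int := ((lp.1 - tp.1).natAbs : Int) + ((lp.2 - tp.2).natAbs : Int)
      let rd : Int := ((rp.1 - tp.1).natAbs : Int) + ((rp.2 - tp.2).natAbs : Int)
      if ld < rd ∨ (ld = rd ∧ isLeft) then some ('L', num, r) else some ('R', l, num)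
    | _, _, _ => none

-- TABLE = [_step(i // 240, i // 20 % 12, i // 2 % 10, i % 2 == 1) for i in range(2880)]
def pvTABLE : List (Option (Char × Int × Int)) :=
  (PySem.List.pyRange 0 2880 1).map (fun i =>
    pvStep (PySem.Int.floordiv i 240) (PySem.Int.mod (PySem.Int.floordiv i 20) 12)
           (PySem.Int.mod (PySem.Int.floordiv i 2) 10) (PySem.Int.mod i 2 == 1))

-- the for-loop of B; state = the two table indices; none = IndexError from TABLE[...]
def altLoop (h : Int) : List Int → Int → Int → List Char → Option (List Char)
  | [], _, _, acc => some acc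
  | num :: rest, l, r, acc =>
    match PySem.List.pyGet? pvTABLE ((l * 12 + r) * 20 + num * 2 + h) with
    | some (some (ch, l', r')) => altLoop h rest l' r' (acc ++ [ch])
    | _ => none

def solution_alt (numbers : List Int) (hand : String) : String :=
  match altLoop (if hand = "left" then 1 else 0) numbers 10 11 [] with
  | some cs => String.ofList cs
  | none => ""

-- ===== PRECONDITION & SPEC =====
-- Pre_ excludes exactly the inputs where A raises ValueError (a number that is not a
-- keypad digit 0..9 reaches mid.index); B raises IndexError on a key above the table range.
def Pre_solution (numbers : List Int) (hand : String) : Prop :=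
  ∀ n ∈ numbers, 0 ≤ n ∧ n ≤ 9

instance (numbers : List Int) (hand : String) : Decidable (Pre_solution numbers hand) := by
  unfold Pre_solution; infer_instance

def pvWitness_solution : List Int × String := ([1, 3, 4, 5, 8, 2, 1, 4, 5, 9, 5], "right")

def Spec_solution (numbers : List Int) (hand : String) (out : String) : Prop := out = solution_alt numbers hand
instance (numbers : List Int) (hand : String) (out : String) : Decidable (Spec_solution numbers hand out) := by unfold Spec_solution; infer_instance

-- ===== CLAIM =====
def Claim_equal_solution : Prop := ∀ (numbers : List Int) (hand : String), Dom_solution numbers hand → Pre_solution numbers hand → Spec_solution numbers hand (solution numbers hand)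

-- ===== LEMMAS AND PROOFS =====

-- A-state → B table index for each thumb (-1 is '*', a right-hand 1 is '#')
def lidx (n : Int) : Int := if n = -1 then 10 else n
def ridx (n : Int) : Int := if n = 1 then 11 else n

lemma decode_idx (l r num h : Int) (hl : 0 ≤ l ∧ l < 12) (hr : 0 ≤ r ∧ r < 12)
    (hn : 0 ≤ num ∧ num < 10) (hh : 0 ≤ h ∧ h < 2) :
    PySem.Int.floordiv ((l * 12 + r) * 20 + num * 2 + h) 240 = l ∧
    PySem.Int.mod (PySem.Int.floordiv ((l * 12 + r) * 20 + num * 2 + h) 20) 12 = r ∧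
    PySem.Int.mod (PySem.Int.floordiv ((l * 12 + r) * 20 + num * 2 + h) 2) 10 = num ∧
    PySem.Int.mod ((l * 12 + r) * 20 + num * 2 + h) 2 = h := by
  rw [PySem.Int.floordiv_eq_ediv_of_pos (by norm_num : (0:Int) < 240),
      PySem.Int.floordiv_eq_ediv_of_pos (by norm_num : (0:Int) < 20),
      PySem.Int.floordiv_eq_ediv_of_pos (by norm_num : (0:Int) < 2),
      PySem.Int.mod_eq_emod_of_pos (by norm_num : (0:Int) < 12),
      PySem.Int.mod_eq_emod_of_pos (by norm_num : (0:Int) < 10),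
      PySem.Int.mod_eq_emod_of_pos (by norm_num : (0:Int) < 2)]
  omega

-- a table lookup at the encoded state is _step of the decoded state
lemma tab_get (l r num h : Int) (hl : 0 ≤ l ∧ l < 12) (hr : 0 ≤ r ∧ r < 12)
    (hn : 0 ≤ num ∧ num < 10) (hh : 0 ≤ h ∧ h < 2) :
    PySem.List.pyGet? pvTABLE ((l * 12 + r) * 20 + num * 2 + h) = some (pvStep l r num (h == 1)) := by
  have h0 : 0 ≤ (l * 12 + r) * 20 + num * 2 + h := by omega
  have h1 : ((l * 12 + r) * 20 + num * 2 + h).toNat < 2880 := by omega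
  have hcast : (((l * 12 + r) * 20 + num * 2 + h).toNat : Int) = (l * 12 + r) * 20 + num * 2 + h := by omega
  unfold pvTABLE
  rw [PySem.List.pyGet?_of_nonneg _ h0]
  rw [show ((2880 : Int)) = ((2880 : Nat) : Int) from rfl]
  rw [PySem.List.getElem?_map_pyRange_zero _ 2880 _ h1, hcast]
  have hd := decode_idx l r num h hl hr hn hh
  rw [hd.1, hd.2.1, hd.2.2.1, hd.2.2.2]

lemma lidx_bounds (left : Int) (hl : left ∈ ([-1, 1, 4, 7, 2, 5, 8, 0] : List Int)) :
    0 ≤ lidx left ∧ lidx left < 12 := by fin_cases hl <;> decide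

lemma ridx_bounds (right : Int) (hr : right ∈ ([1, 3, 6, 9, 2, 5, 8, 0] : List Int)) :
    0 ≤ ridx right ∧ ridx right < 12 := by fin_cases hr <;> decide

-- on a middle-column key, _step at the translated state makes exactly A's decision
lemma mid_step (left right num : Int)
    (hl : left ∈ ([-1, 1, 4, 7, 2, 5, 8, 0] : List Int))
    (hr : right ∈ ([1, 3, 6, 9, 2, 5, 8, 0] : List Int))
    (hn : num = 0 ∨ num = 2 ∨ num = 5 ∨ num = 8) (b : Bool) :
    pvStep (lidx left) (ridx right) num b =
      (match getld left num, getrd right num with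
       | some ld, some rd =>
         if ld = rd then (if b then some ('L', num, ridx right) else some ('R', lidx left, num))
         else if ld > rd then some ('R', lidx left, num)
         else some ('L', num, ridx right)
       | _, _ => none) := by
  fin_cases hl <;> fin_cases hr <;> rcases hn with rfl | rfl | rfl | rfl <;> cases b <;> decide

lemma loop_eq (hand : String) (rest : List Int) :
    ∀ (left right : Int) (acc : List Char),
    (∀ n ∈ rest, 0 ≤ n ∧ n ≤ 9) →
    left ∈ ([-1, 1, 4, 7, 2, 5, 8, 0] : List Int) →
    right ∈ ([1, 3, 6, 9, 2, 5, 8, 0] : List Int) →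
    solutionLoop hand rest left right acc
      = altLoop (if hand = "left" then 1 else 0) rest (lidx left) (ridx right) acc := by
  induction rest with
  | nil => intro _ _ _ _ _ _; rfl
  | cons num rest ih =>
    intro left right acc hpre hl hr
    have hnum := hpre num (List.mem_cons_self ..)
    have htail : ∀ n ∈ rest, 0 ≤ n ∧ n ≤ 9 := fun n hn => hpre n (List.mem_cons_of_mem _ hn)
    have hh : 0 ≤ (if hand = "left" then (1:Int) else 0) ∧ (if hand = "left" then (1:Int) else 0) < 2 := by
      split <;> norm_num
    have htab := tab_get (lidx left) (ridx right) num (if hand = "left" then 1 else 0)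
      (lidx_bounds left hl) (ridx_bounds right hr) ⟨hnum.1, by omega⟩ hh
    have hb : ((if hand = "left" then (1:Int) else 0) == 1) = decide (hand = "left") := by
      by_cases hx : hand = "left" <;> simp [hx]
    rw [hb] at htab
    have hnum0 : 0 ≤ num := hnum.1
    have hnum9 : num ≤ 9 := hnum.2
    interval_cases num <;> simp only [altLoop, htab]
    · rw [mid_step left right 0 hl hr (by norm_num) _]
      simp only [solutionLoop]
      norm_num
      cases hld : getld left 0 with
      | none => rfl
      | some ld =>
        cases hrd : getrd right 0 with
        | none => rfl
        | some rd =>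
          by_cases h1 : ld = rd
          · subst h1
            by_cases h2 : hand = "left"
            · simp [h2] at ih ⊢
              exact ih 0 right (acc ++ ['L']) htail (by norm_num) (by simpa using hr)
            · simp [h2] at ih ⊢
              exact ih left 0 (acc ++ ['R']) htail (by simpa using hl) (by norm_num)
          · by_cases h3 : ld > rd
            · simp [h1, h3]
              exact ih left 0 (acc ++ ['R']) htail hl (by decide)
            · simp [h1, h3]
              exact ih 0 right (acc ++ ['L']) htail (by decide) hr
    · simp only [solutionLoop]
      norm_num
      exact ih 1 right (acc ++ ['L']) htail (by decide) hr
    · rw [mid_step left right 2 hl hr (by norm_num) _]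
      simp only [solutionLoop]
      norm_num
      cases hld : getld left 2 with
      | none => rfl
      | some ld =>
        cases hrd : getrd right 2 with
        | none => rfl
        | some rd =>
          by_cases h1 : ld = rd
          · subst h1
            by_cases h2 : hand = "left"
            · simp [h2] at ih ⊢
              exact ih 2 right (acc ++ ['L']) htail (by norm_num) (by simpa using hr)
            · simp [h2] at ih ⊢
              exact ih left 2 (acc ++ ['R']) htail (by simpa using hl) (by norm_num)
          · by_cases h3 : ld > rd
            · simp [h1, h3]
              exact ih left 2 (acc ++ ['R']) htail hl (by decide)
            · simp [h1, h3]
              exact ih 2 right (acc ++ ['L']) htail (by decide) hr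
    · simp only [solutionLoop]
      norm_num
      exact ih left 3 (acc ++ ['R']) htail hl (by decide)
    · simp only [solutionLoop]
      norm_num
      exact ih 4 right (acc ++ ['L']) htail (by decide) hr
    · rw [mid_step left right 5 hl hr (by norm_num) _]
      simp only [solutionLoop]
      norm_num
      cases hld : getld left 5 with
      | none => rfl
      | some ld =>
        cases hrd : getrd right 5 with
        | none => rfl
        | some rd =>
          by_cases h1 : ld = rd
          · subst h1
            by_cases h2 : hand = "left"
            · simp [h2] at ih ⊢
              exact ih 5 right (acc ++ ['L']) htail (by norm_num) (by simpa using hr)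
            · simp [h2] at ih ⊢
              exact ih left 5 (acc ++ ['R']) htail (by simpa using hl) (by norm_num)
          · by_cases h3 : ld > rd
            · simp [h1, h3]
              exact ih left 5 (acc ++ ['R']) htail hl (by decide)
            · simp [h1, h3]
              exact ih 5 right (acc ++ ['L']) htail (by decide) hr
    · simp only [solutionLoop]
      norm_num
      exact ih left 6 (acc ++ ['R']) htail hl (by decide)
    · simp only [solutionLoop]
      norm_num
      exact ih 7 right (acc ++ ['L']) htail (by decide) hr
    · rw [mid_step left right 8 hl hr (by norm_num) _]
      simp only [solutionLoop]
      norm_num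
      cases hld : getld left 8 with
      | none => rfl
      | some ld =>
        cases hrd : getrd right 8 with
        | none => rfl
        | some rd =>
          by_cases h1 : ld = rd
          · subst h1
            by_cases h2 : hand = "left"
            · simp [h2] at ih ⊢
              exact ih 8 right (acc ++ ['L']) htail (by norm_num) (by simpa using hr)
            · simp [h2] at ih ⊢
              exact ih left 8 (acc ++ ['R']) htail (by simpa using hl) (by norm_num)
          · by_cases h3 : ld > rd
            · simp [h1, h3]
              exact ih left 8 (acc ++ ['R']) htail hl (by decide)
            · simp [h1, h3]
              exact ih 8 right (acc ++ ['L']) htail (by decide) hr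
    · simp only [solutionLoop]
      norm_num
      exact ih left 9 (acc ++ ['R']) htail hl (by decide)

-- ===== VERDICT =====
theorem solution_spec : Claim_equal_solution := by
  intro numbers hand _ hpre
  unfold Spec_solution solution solution_alt
  rw [loop_eq hand numbers (-1) 1 [] hpre (by decide) (by decide)]
  rfl
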